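-- pv_equiv track=rewrite | github.com/pixelchai/AdventOfCode2020 | 05/05p1.py | parse_line_col
-- ===== SOURCE A (Python) =====
-- def parse_line_col(line):
--     line = line[-3:]
--     values = list(range(8))
--     for c in line:
--         if c == 'L':
--             values = values[:len(values) // 2]
--         elif c == 'R':
--             values = values[len(values) // 2:]
--     return values[0]
-- ===== SOURCE B (Python) =====
-- def parse_line_col(line):
--     # Closed-form: among the last 3 chars, the i-th L/R char (0-based) contributes
--     # 8 >> (i+1) when it is 'R'; other chars are skipped exactly as in A.
--     s = [c for c in line[-3:] if c in 'LR']
--     return sum(8 >> (i + 1) for i, c in enumerate(s) if c == 'R')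
-- ===== Notes on version B (the rewrite author's own statement) =====
-- stated objective: simpler
-- what changed: Replaces the candidate-list halving loop (slicing a list of 8 values) by a closed-form weighted sum: filter the last three chars to L/R and add 8>>(i+1) for each 'R' at position i.
import Mathlib
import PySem

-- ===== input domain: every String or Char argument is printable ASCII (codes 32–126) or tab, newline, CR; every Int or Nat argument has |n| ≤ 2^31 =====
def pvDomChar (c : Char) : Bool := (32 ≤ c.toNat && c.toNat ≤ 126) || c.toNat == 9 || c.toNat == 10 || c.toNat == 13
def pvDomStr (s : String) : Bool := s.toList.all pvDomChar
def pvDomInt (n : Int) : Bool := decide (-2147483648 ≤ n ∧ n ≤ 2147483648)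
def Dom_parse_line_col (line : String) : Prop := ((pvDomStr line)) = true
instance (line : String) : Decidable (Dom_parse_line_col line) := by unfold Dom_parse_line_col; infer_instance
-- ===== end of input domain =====

-- B replaces A's candidate-list halving by a closed-form weighted sum over the L/R chars
-- of line[-3:] (objective: simpler).


-- ===== PORT A =====
-- one loop step of A: halve the candidate list on 'L'/'R', leave it on any other char
def pvAStep (vs : List Int) (c : Char) : List Int :=
  if c = 'L' then PySem.List.slice vs none (some (PySem.Int.floordiv vs.length 2))
  else if c = 'R' then PySem.List.slice vs (some (PySem.Int.floordiv vs.length 2)) none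
  else vs

def parse_line_col (line : String) : Int :=
  -- line = line[-3:]; values = list(range(8)); the for-loop folds pvAStep over the chars;
  -- the final values list is provably nonempty (8 elements halved at most 3 times), so
  -- Python's values[0] never raises and pyGet? is always some; getD's default is unreachable
  (PySem.List.pyGet?
    ((PySem.List.slice line.toList (some (-3)) none).foldl pvAStep (PySem.List.pyRange 0 8 1))
    0).getD 0

-- ===== PORT B =====
def parse_line_col_alt (line : String) : Int :=
  -- s = [c for c in line[-3:] if c in 'LR']; sum of 8 >> (i+1) over the 'R's of enumerate(s)
  (PySem.List.enumerate
    ((PySem.List.slice line.toList (some (-3)) none).filter (fun c => c == 'L' || c == 'R'))).foldl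
    (fun acc p => if p.2 == 'R' then acc + ((8 : Int) >>> (p.1 + 1).toNat) else acc) 0

-- ===== PRECONDITION & SPEC =====
def Spec_parse_line_col (line : String) (out : Int) : Prop := out = parse_line_col_alt line
instance (line : String) (out : Int) : Decidable (Spec_parse_line_col line out) := by unfold Spec_parse_line_col; infer_instance

-- ===== CLAIM (what is proved, stated in full; the proofs are below) =====
def Claim_equal_parse_line_col : Prop := ∀ (line : String), Dom_parse_line_col line → Spec_parse_line_col line (parse_line_col line)

-- ===== LEMMAS AND PROOFS =====

set_option maxHeartbeats 1000000 in
theorem key (cs : List Char) (h : cs.length ≤ 3) :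
    (PySem.List.pyGet? (cs.foldl pvAStep (PySem.List.pyRange 0 8 1)) 0).getD 0 =
    (PySem.List.enumerate (cs.filter (fun c => c == 'L' || c == 'R'))).foldl
      (fun acc p => if p.2 == 'R' then acc + ((8 : Int) >>> (p.1 + 1).toNat) else acc) 0 := by
  have h8 : PySem.List.pyRange 0 8 1 = [0,1,2,3,4,5,6,7] := by decide
  match cs with
  | [] => rw [h8]; decide
  | [a] =>
    rw [h8]
    by_cases ha : a = 'L' <;> by_cases ha' : a = 'R' <;>
      simp_all [pvAStep, List.filter_nil] <;> decide
  | [a, b] =>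
    rw [h8]
    by_cases ha : a = 'L' <;> by_cases ha' : a = 'R' <;>
    by_cases hb : b = 'L' <;> by_cases hb' : b = 'R' <;>
      simp_all [pvAStep, List.filter_nil] <;> decide
  | [a, b, c] =>
    rw [h8]
    by_cases ha : a = 'L' <;> by_cases ha' : a = 'R' <;>
    by_cases hb : b = 'L' <;> by_cases hb' : b = 'R' <;>
    by_cases hc : c = 'L' <;> by_cases hc' : c = 'R' <;>
      simp_all [pvAStep, List.filter_nil] <;> decide
  | _ :: _ :: _ :: _ :: t => simp [List.length] at h; omega

-- ===== VERDICT (by name: the statement is the Claim_ definition above) =====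
theorem parse_line_col_spec : Claim_equal_parse_line_col := by
  intro line _
  unfold Spec_parse_line_col parse_line_col parse_line_col_alt
  rw [PySem.List.slice_from_neg_ofNat line.toList 3 (by omega)]
  have hlen : (line.toList.drop (line.toList.length - 3)).length ≤ 3 := by
    rw [List.length_drop]; omega
  exact key _ hlen
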